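-- pv_equiv track=rewrite | github.com/Arkioner/CourseraWhatIsAProof | src/DiceProject/DiceProject.py | count_wins
-- ===== SOURCE A (Python) =====
-- import itertools
--
-- def count_wins(dice1, dice2):
--     assert len(dice1) == 6 and len(dice2) == 6
--     dice1_wins, dice2_wins = 0, 0
--
--     for pair in list(itertools.product(dice1, dice2)):
--         if pair[0] > pair[1]:
--             dice1_wins += 1
--         elif pair[0] < pair[1]:
--             dice2_wins += 1
--
--     return dice1_wins, dice2_wins
-- ===== SOURCE B (Python) =====
-- def _bisect_left(a, x):
--     # CPython's bisect_left loop (bisect module not imported by the original file)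
--     lo, hi = 0, len(a)
--     while lo < hi:
--         mid = (lo + hi) // 2
--         if a[mid] < x:
--             lo = mid + 1
--         else:
--             hi = mid
--     return lo
--
--
-- def _bisect_right(a, x):
--     lo, hi = 0, len(a)
--     while lo < hi:
--         mid = (lo + hi) // 2
--         if x < a[mid]:
--             hi = mid
--         else:
--             lo = mid + 1
--     return lo
--
--
-- def count_wins(dice1, dice2):
--     assert len(dice1) == 6 and len(dice2) == 6
--     s = sorted(dice2)
--     dice1_wins, dice2_wins = 0, 0
--     for v in dice1:
--         dice1_wins += _bisect_left(s, v)          # elements of dice2 strictly below v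
--         dice2_wins += len(s) - _bisect_right(s, v)  # elements strictly above v
--     return dice1_wins, dice2_wins
-- ===== Notes on version B (the rewrite author's own statement) =====
-- stated objective: alternative
-- what changed: Replaces the scan over all 36 itertools.product pairs with a sort of dice2 plus per-element binary-search counting (bisect_left for strictly-smaller, len - bisect_right for strictly-greater).
import Mathlib
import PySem

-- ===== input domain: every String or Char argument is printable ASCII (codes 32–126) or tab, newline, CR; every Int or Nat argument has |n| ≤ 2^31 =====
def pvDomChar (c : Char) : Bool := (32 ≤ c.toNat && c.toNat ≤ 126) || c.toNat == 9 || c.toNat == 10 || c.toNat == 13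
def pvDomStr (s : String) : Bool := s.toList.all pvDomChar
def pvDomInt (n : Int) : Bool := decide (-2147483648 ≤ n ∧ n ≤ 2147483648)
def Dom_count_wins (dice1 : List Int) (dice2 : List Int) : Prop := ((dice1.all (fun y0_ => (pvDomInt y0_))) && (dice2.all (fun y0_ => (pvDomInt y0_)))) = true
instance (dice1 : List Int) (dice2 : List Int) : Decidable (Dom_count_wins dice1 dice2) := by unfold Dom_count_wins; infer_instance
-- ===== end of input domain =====

-- B replaces the full scan over all itertools.product pairs by sorting dice2 once and
-- counting strictly-smaller / strictly-greater elements per die face with binary search.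


-- ===== PORT A =====
def count_wins (dice1 : List Int) (dice2 : List Int) : Int × Int :=
  -- list(itertools.product(dice1, dice2))
  let pairs := dice1.flatMap (fun a => dice2.map (fun b => (a, b)))
  pairs.foldl (fun (w : Int × Int) pair =>
    if pair.1 > pair.2 then (w.1 + 1, w.2)
    else if pair.1 < pair.2 then (w.1, w.2 + 1)
    else w) (0, 0)

-- ===== PORT B =====
-- _bisect_left/_bisect_right in Source B are exactly CPython's bisect loops,
-- which is what PySem.List.bisectLeft / bisectRight implement.
def count_wins_alt (dice1 : List Int) (dice2 : List Int) : Int × Int :=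
  let s := PySem.List.sorted dice2 (fun x => x) false
  dice1.foldl (fun (w : Int × Int) v =>
    (w.1 + (PySem.List.bisectLeft s v : Int),
     w.2 + ((s.length : Int) - (PySem.List.bisectRight s v : Int)))) (0, 0)

-- ===== PRECONDITION & SPEC =====
-- A asserts len(dice1) == 6 and len(dice2) == 6 and raises AssertionError otherwise.
def Pre_count_wins (dice1 : List Int) (dice2 : List Int) : Prop :=
  dice1.length = 6 ∧ dice2.length = 6
instance (dice1 : List Int) (dice2 : List Int) : Decidable (Pre_count_wins dice1 dice2) := by
  unfold Pre_count_wins; infer_instance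
def pvWitness_count_wins : List Int × List Int := ([1, 2, 3, 4, 5, 6], [3, 3, 3, 4, 4, 4])

def Spec_count_wins (dice1 : List Int) (dice2 : List Int) (out : Int × Int) : Prop := out = count_wins_alt dice1 dice2
instance (dice1 : List Int) (dice2 : List Int) (out : Int × Int) : Decidable (Spec_count_wins dice1 dice2 out) := by unfold Spec_count_wins; infer_instance

-- ===== CLAIM (what is proved, stated in full; the proofs are below) =====
def Claim_equal_count_wins : Prop := ∀ (dice1 : List Int) (dice2 : List Int), Dom_count_wins dice1 dice2 → Pre_count_wins dice1 dice2 → Spec_count_wins dice1 dice2 (count_wins dice1 dice2)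

-- ===== LEMMAS AND PROOFS =====

-- On a sorted list, bisectLeft counts the elements strictly below v.
theorem bisectLeft_eq_countP (s : List Int) (v : Int)
    (hs : s.Pairwise (· ≤ ·)) :
    s.countP (fun b => decide (b < v)) = PySem.List.bisectLeft s v := by
  obtain ⟨hle, hlt, hge⟩ := PySem.List.bisectLeft_spec s v hs
  set k := PySem.List.bisectLeft s v with hk
  have hsplit : s = s.take k ++ s.drop k := (List.take_append_drop k s).symm
  rw [hsplit, List.countP_append]
  have h1 : (s.take k).countP (fun b => decide (b < v)) = (s.take k).length := by
    rw [List.countP_eq_length]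
    intro a ha
    obtain ⟨j, hj, rfl⟩ := List.getElem_of_mem ha
    have hjk : j < k := lt_of_lt_of_le hj (by simp)
    have hjs : j < s.length := lt_of_lt_of_le hjk hle
    have := hlt j hjs hjk
    simpa [List.getElem_take] using this
  have h2 : (s.drop k).countP (fun b => decide (b < v)) = 0 := by
    rw [List.countP_eq_zero]
    intro a ha
    obtain ⟨j, hj, rfl⟩ := List.getElem_of_mem ha
    have hjs : k + j < s.length := by
      have := hj; simp [List.length_drop] at this; omega
    have := hge (k + j) hjs (Nat.le_add_right _ _)
    simp only [List.getElem_drop]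
    simpa using not_lt.mpr this
  rw [h1, h2, List.length_take]
  omega

-- On a sorted list, bisectRight counts the elements ≤ v.
theorem bisectRight_eq_countP (s : List Int) (v : Int)
    (hs : s.Pairwise (· ≤ ·)) :
    s.countP (fun b => decide (b ≤ v)) = PySem.List.bisectRight s v := by
  obtain ⟨hle, hlt, hge⟩ := PySem.List.bisectRight_spec s v hs
  set k := PySem.List.bisectRight s v with hk
  have hsplit : s = s.take k ++ s.drop k := (List.take_append_drop k s).symm
  rw [hsplit, List.countP_append]
  have h1 : (s.take k).countP (fun b => decide (b ≤ v)) = (s.take k).length := by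
    rw [List.countP_eq_length]
    intro a ha
    obtain ⟨j, hj, rfl⟩ := List.getElem_of_mem ha
    have hjk : j < k := lt_of_lt_of_le hj (by simp)
    have hjs : j < s.length := lt_of_lt_of_le hjk hle
    have := hlt j hjs hjk
    simpa [List.getElem_take] using this
  have h2 : (s.drop k).countP (fun b => decide (b ≤ v)) = 0 := by
    rw [List.countP_eq_zero]
    intro a ha
    obtain ⟨j, hj, rfl⟩ := List.getElem_of_mem ha
    have hjs : k + j < s.length := by
      have := hj; simp [List.length_drop] at this; omega
    have := hge (k + j) hjs (Nat.le_add_right _ _)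
    simp only [List.getElem_drop]
    simpa using not_le.mpr this
  rw [h1, h2, List.length_take]
  omega

-- Elements ≤ v and elements > v partition a list.
theorem countP_le_add_lt (l : List Int) (v : Int) :
    l.countP (fun b => decide (b ≤ v)) + l.countP (fun b => decide (v < b)) = l.length := by
  induction l with
  | nil => simp
  | cons b t ih =>
      rw [List.countP_cons, List.countP_cons]
      by_cases h : b ≤ v
      · simp [h, not_lt.mpr h]
        omega
      · simp [h, not_le.mp h]
        omega

-- A's inner pass over dice2 (one fixed a) adds the two strict counts.
theorem inner_fold (a : Int) (l : List Int) (w : Int × Int) :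
    (l.map (fun b => (a, b))).foldl (fun (w : Int × Int) pair =>
        if pair.1 > pair.2 then (w.1 + 1, w.2)
        else if pair.1 < pair.2 then (w.1, w.2 + 1)
        else w) w
      = (w.1 + (l.countP (fun b => decide (b < a)) : Int),
         w.2 + (l.countP (fun b => decide (a < b)) : Int)) := by
  induction l generalizing w with
  | nil => simp
  | cons b t ih =>
      simp only [List.map_cons, List.foldl_cons, List.countP_cons]
      rcases lt_trichotomy a b with h | h | h
      · rw [if_neg (by omega), if_pos h, ih]
        simp [not_lt.mpr (le_of_lt h), h]
        omega
      · subst h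
        rw [if_neg (by omega), if_neg (by omega), ih]
        simp
      · rw [if_pos h, ih]
        simp [not_lt.mpr (le_of_lt h), h]
        omega

-- A's product fold equals the canonical per-face count fold.
theorem a_fold (d1 d2 : List Int) (w : Int × Int) :
    (d1.flatMap (fun a => d2.map (fun b => (a, b)))).foldl
      (fun (w : Int × Int) pair =>
        if pair.1 > pair.2 then (w.1 + 1, w.2)
        else if pair.1 < pair.2 then (w.1, w.2 + 1)
        else w) w
    = d1.foldl (fun (w : Int × Int) a =>
        (w.1 + (d2.countP (fun b => decide (b < a)) : Int),
         w.2 + (d2.countP (fun b => decide (a < b)) : Int))) w := by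
  induction d1 generalizing w with
  | nil => simp
  | cons a t ih =>
      simp only [List.flatMap_cons, List.foldl_append, List.foldl_cons]
      rw [inner_fold, ih]

theorem count_wins_spec_aux (dice1 dice2 : List Int) :
    count_wins dice1 dice2 = count_wins_alt dice1 dice2 := by
  unfold count_wins count_wins_alt
  rw [a_fold]
  set s := PySem.List.sorted dice2 (fun x => x) false with hsdef
  have hperm : s.Perm dice2 := PySem.List.sorted_perm dice2 (fun x => x) false
  have hs : s.Pairwise (· ≤ ·) := by
    have := PySem.List.sorted_pairwise dice2 (fun x => x)
    simpa using this
  have hstep : (fun (w : Int × Int) a =>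
        (w.1 + (dice2.countP (fun b => decide (b < a)) : Int),
         w.2 + (dice2.countP (fun b => decide (a < b)) : Int)))
      = (fun (w : Int × Int) v =>
        (w.1 + (PySem.List.bisectLeft s v : Int),
         w.2 + ((s.length : Int) - (PySem.List.bisectRight s v : Int)))) := by
    funext w v
    have hlt : dice2.countP (fun b => decide (b < v)) = PySem.List.bisectLeft s v := by
      rw [← hperm.countP_eq]; exact bisectLeft_eq_countP s v hs
    have hle : dice2.countP (fun b => decide (b ≤ v)) = PySem.List.bisectRight s v := by
      rw [← hperm.countP_eq]; exact bisectRight_eq_countP s v hs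
    have hlen : s.length = dice2.length := hperm.length_eq
    have hsplit : dice2.countP (fun b => decide (b ≤ v))
        + dice2.countP (fun b => decide (v < b)) = dice2.length := by
      exact countP_le_add_lt dice2 v
    refine Prod.ext ?_ ?_
    · simp [hlt]
    · simp only
      rw [hlen]
      omega
  rw [hstep]

-- ===== VERDICT (by name: the statement is the Claim_ definition above) =====
theorem count_wins_spec : Claim_equal_count_wins := by
  intro dice1 dice2 _ _
  exact count_wins_spec_aux dice1 dice2
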